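-- pv_equiv track=rewrite | github.com/YinboChen/COMP_6700_Rubik-s-Cube | rubik/model/cube.py | _checkOccurrencesOfLegalChar
-- ===== SOURCE A (Python) =====
-- def _checkOccurrencesOfLegalChar(encodedCube):
--     theNumbleOfCharOnOneFace = 9
--     validationCubeChar = set(encodedCube)
--     result = False
--
--     for char in validationCubeChar:
--         if encodedCube.count(char)!=theNumbleOfCharOnOneFace:
--             result = False
--             break
--         else:
--             result = True
--             continue
--     return result
-- ===== SOURCE B (Python) =====
-- def _checkOccurrencesOfLegalChar(encodedCube):
--     # Strip one equivalence class per round: remove every copy of the first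
--     # remaining character and demand exactly 9 were removed; succeed when the
--     # list is exhausted.  A nonempty input is required (A returns False on "").
--     rest = list(encodedCube)
--     if not rest:
--         return False
--     while rest:
--         ch = rest[0]
--         remaining = [c for c in rest if c != ch]
--         if len(rest) - len(remaining) != 9:
--             return False
--         rest = remaining
--     return True
-- ===== Notes on version B (the rewrite author's own statement) =====
-- stated objective: alternative
-- what changed: B uses a class-stripping recursion: it repeatedly removes all copies of the first remaining character, checks that exactly 9 were removed, and succeeds when the list is exhausted, instead of A's set construction plus a .count rescan of the whole string per distinct character.
import Mathlib
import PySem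

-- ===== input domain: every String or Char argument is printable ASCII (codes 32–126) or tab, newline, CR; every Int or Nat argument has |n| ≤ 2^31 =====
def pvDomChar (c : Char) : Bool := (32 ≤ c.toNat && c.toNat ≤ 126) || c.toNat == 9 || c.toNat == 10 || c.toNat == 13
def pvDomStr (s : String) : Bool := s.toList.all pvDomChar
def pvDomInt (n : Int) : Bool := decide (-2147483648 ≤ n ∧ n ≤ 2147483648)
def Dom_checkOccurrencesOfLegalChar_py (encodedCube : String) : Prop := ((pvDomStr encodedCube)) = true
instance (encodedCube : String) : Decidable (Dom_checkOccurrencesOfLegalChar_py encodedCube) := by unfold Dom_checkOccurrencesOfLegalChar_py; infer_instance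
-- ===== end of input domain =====

-- B replaces A's set-then-rescan (.count over the whole string per distinct char) by a
-- class-stripping loop that removes one character class per round from a shrinking list;
-- objective: alternative (same result, genuinely different traversal).
-- A's result does not depend on the (unmodelled) set iteration order: it is
-- 'nonempty and every distinct char occurs exactly 9 times'.

-- ===== PORT A =====
-- the for-loop over set(encodedCube) with break: structural recursion, same flag/break behaviour
def pvLoopA (full : List Char) : List Char → Bool → Bool
  | [], result => result
  | c :: rest, _ =>
      if full.count c ≠ 9 then false else pvLoopA full rest true

def checkOccurrencesOfLegalChar_py (encodedCube : String) : Bool :=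
  let validationCubeChar := PySem.Set.ofList encodedCube.toList
  pvLoopA encodedCube.toList validationCubeChar false

-- ===== PORT B =====
-- the while-loop of Source B: each round strips every copy of the head character,
-- demanding exactly 9 removed (len(rest) - len(remaining) is Python int arithmetic)
def pvStripB : List Char → Bool
  | [] => true
  | c :: rest =>
      if (((c :: rest).length : Int) - (((c :: rest).filter (fun x => decide (x ≠ c))).length : Int)) ≠ 9 then false
      else pvStripB ((c :: rest).filter (fun x => decide (x ≠ c)))
termination_by l => l.length
decreasing_by
  simp only [List.filter_cons, decide_not, decide_true, Bool.not_true, List.length_cons]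
  simp
  exact List.length_filter_le _ _

def checkOccurrencesOfLegalChar_py_alt (encodedCube : String) : Bool :=
  if encodedCube.toList.isEmpty then false else pvStripB encodedCube.toList

-- ===== PRECONDITION & SPEC =====
def Spec_checkOccurrencesOfLegalChar_py (encodedCube : String) (out : Bool) : Prop := out = checkOccurrencesOfLegalChar_py_alt encodedCube
instance (encodedCube : String) (out : Bool) : Decidable (Spec_checkOccurrencesOfLegalChar_py encodedCube out) := by unfold Spec_checkOccurrencesOfLegalChar_py; infer_instance

-- ===== CLAIM (what is proved, stated in full; the proofs are below) =====
def Claim_equal_checkOccurrencesOfLegalChar_py : Prop := ∀ (encodedCube : String), Dom_checkOccurrencesOfLegalChar_py encodedCube → Spec_checkOccurrencesOfLegalChar_py encodedCube (checkOccurrencesOfLegalChar_py encodedCube)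

-- ===== LEMMAS AND PROOFS =====

-- A's loop computes: if the char list is empty return the incoming flag, else 'all counts are 9'
theorem pvLoopA_eq (full : List Char) (l : List Char) (b : Bool) :
    pvLoopA full l b = if l = [] then b else l.all (fun c => full.count c == 9) := by
  induction l generalizing b with
  | nil => simp [pvLoopA]
  | cons c rest ih =>
      simp only [pvLoopA, ih, List.all_cons]
      by_cases h : full.count c = 9 <;> rcases rest with _ | ⟨d, rest⟩ <;> simp [h]

-- counts of the other characters survive the strip
theorem count_filter_ne (l : List Char) (c d : Char) (h : d ≠ c) :
    (l.filter (fun x => decide (x ≠ c))).count d = l.count d := by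
  rw [List.count_filter]
  simp [h]

-- the number of removed elements is the count of the stripped character
theorem length_sub_filter (l : List Char) (c : Char) :
    l.length - (l.filter (fun x => decide (x ≠ c))).length = l.count c := by
  have h := List.length_eq_countP_add_countP (p := fun x => decide (x ≠ c)) (l := l)
  have hc : l.countP (fun x => decide ¬(decide (x ≠ c) = true)) = l.count c := by
    rw [List.count_eq_countP]
    apply List.countP_congr
    intro x _
    by_cases hx : x = c <;> simp [hx]
  rw [← List.countP_eq_length_filter]
  omega

-- stripping the class of a char whose count is 9 preserves 'all counts are 9'
theorem all_iff_strip (l : List Char) (c : Char) (h9 : l.count c = 9) :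
    (∀ x ∈ l, l.count x = 9) ↔
      (∀ x ∈ l.filter (fun x => decide (x ≠ c)),
        (l.filter (fun x => decide (x ≠ c))).count x = 9) := by
  constructor
  · intro h x hx
    have hm := List.mem_filter.mp hx
    have hxc : x ≠ c := by simpa using hm.2
    rw [count_filter_ne l c x hxc]
    exact h x hm.1
  · intro h x hx
    by_cases hxc : x = c
    · subst hxc; exact h9
    · rw [← count_filter_ne l c x hxc]
      exact h x (List.mem_filter.mpr ⟨hx, by simpa using hxc⟩)

-- B's strip loop decides 'every char of l occurs exactly 9 times in l'
theorem pvStripB_eq (l : List Char) :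
    pvStripB l = l.all (fun c => l.count c == 9) := by
  induction hn : l.length using Nat.strong_induction_on generalizing l with
  | _ n ih =>
  match l with
  | [] => rw [pvStripB]; rfl
  | c :: rest =>
    rw [pvStripB]
    have hle : ((c :: rest).filter (fun x => decide (x ≠ c))).length ≤ rest.length := by
      simp only [List.filter_cons, decide_not, decide_true, Bool.not_true]
      simpa using List.length_filter_le _ _
    have hlen := length_sub_filter (c :: rest) c
    by_cases h9 : (c :: rest).count c = 9
    · rw [if_neg (by simp only [List.length_cons] at *; omega)]
      rw [ih _ (by omega) _ rfl]
      rw [Bool.eq_iff_iff]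
      simp only [List.all_eq_true, beq_iff_eq]
      exact (all_iff_strip (c :: rest) c h9).symm
    · rw [if_pos (by simp only [List.length_cons] at *; omega)]
      symm
      rw [List.all_eq_false]
      exact ⟨c, List.mem_cons_self, by simpa using h9⟩

-- ===== VERDICT (by name: the statement is the Claim_ definition above) =====
theorem checkOccurrencesOfLegalChar_py_spec : Claim_equal_checkOccurrencesOfLegalChar_py := by
  intro s _
  unfold Spec_checkOccurrencesOfLegalChar_py checkOccurrencesOfLegalChar_py checkOccurrencesOfLegalChar_py_alt
  rw [pvLoopA_eq, pvStripB_eq]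
  by_cases h : s.toList = []
  · simp [h]
  · have hset : PySem.Set.ofList s.toList ≠ [] := by
      rcases List.exists_mem_of_ne_nil _ h with ⟨x, hx⟩
      intro he
      have : x ∈ PySem.Set.ofList s.toList := (PySem.Set.mem_ofList _ _).mpr hx
      simp [he] at this
    rw [if_neg hset]
    have hie : s.toList.isEmpty = false := by simpa [List.isEmpty_iff] using h
    rw [hie, if_neg (by simp)]
    -- all over the distinct chars = all over the list itself (same membership)
    rw [Bool.eq_iff_iff]
    simp only [List.all_eq_true]
    constructor
    · intro hA x hx; exact hA x ((PySem.Set.mem_ofList _ _).mpr hx)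
    · intro hB x hx; exact hB x ((PySem.Set.mem_ofList _ _).mp hx)
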